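-- pv_equiv track=rewrite | github.com/dynamite-123/cses-solutions | introductory-problems/op_07_two_nights.py | solve
-- ===== SOURCE A (Python) =====
-- def solve(N):
--     res = []
--     dp = {}
--     dir = [(2, 1), (2, -1), (-2, 1), (-2, -1), (1, 2), (1, -2), (-1, 2), (-1, -2)]
--
--     def check(n, i, j):
--         res = 0
--         for di, dj in dir:
--             ni, nj = i + di, j + dj
--             if 0 <= ni < n - 1 and 0 <= nj < n - 1:
--                 res += 1
--         return res
--
--     def ways(n):  # number of ways where two knights attack each other
--         if n == 1:
--             dp[1] = 0
--             return 0
--         if n == 2: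
--             dp[2] = 0
--             return 0
--         cur = 0
--         for i in range(n - 1):
--             cur += check(n, n - 1, i)
--             cur += check(n, i, n - 1)
--         cur += check(n, n - 1, n - 1)
--         dp[n] = dp[n - 1] + cur + 2
--         return dp[n]
--
--     for i in range(1, N + 1):
--         attacks = ways(i)
--         total = i * i * (i * i - 1) // 2
--         res.append(total - attacks)
--
--     return res
-- ===== SOURCE B (Python) =====
-- def solve(N):
--     # Closed form: attacking pairs on a k x k board = 4*(k-1)*(k-2) (0 for k<=2),
--     # total pairs = k^2*(k^2-1)/2.
--     return [k * k * (k * k - 1) // 2 - 4 * (k - 1) * (k - 2) for k in range(1, N + 1)]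
-- ===== Notes on version B (the rewrite author's own statement) =====
-- stated objective: faster
-- what changed: Replaces the incremental dp recurrence (per-board-size loop over border cells calling a per-cell direction check, memoised in a dict) by the closed form attacks = 4*(k-1)*(k-2), so each answer is k^2*(k^2-1)//2 - 4*(k-1)*(k-2) in O(1).
import Mathlib
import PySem

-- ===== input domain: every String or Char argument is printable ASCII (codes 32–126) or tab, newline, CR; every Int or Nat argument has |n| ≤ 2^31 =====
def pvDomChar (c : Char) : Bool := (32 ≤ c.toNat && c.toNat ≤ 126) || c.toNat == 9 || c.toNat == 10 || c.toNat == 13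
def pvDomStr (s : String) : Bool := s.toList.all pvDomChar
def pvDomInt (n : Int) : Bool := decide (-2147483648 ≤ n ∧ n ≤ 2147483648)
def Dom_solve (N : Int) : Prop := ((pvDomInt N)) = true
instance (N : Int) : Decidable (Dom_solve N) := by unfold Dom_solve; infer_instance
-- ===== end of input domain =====

-- B replaces A's incremental dp recurrence by the closed form attacks = 4*(k-1)*(k-2) (measured asymptotically faster).

-- ===== PORT A =====
def solveDirs : List (Int × Int) := [(2, 1), (2, -1), (-2, 1), (-2, -1), (1, 2), (1, -2), (-1, 2), (-1, -2)]

def solveCheck (n i j : Int) : Int :=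
  solveDirs.foldl (fun res d =>
    let ni := i + d.1
    let nj := j + d.2
    if 0 ≤ ni ∧ ni < n - 1 ∧ 0 ≤ nj ∧ nj < n - 1 then res + 1 else res) 0

-- ways(n): Python reads dp[n-1] for n ≥ 3; that key is always present there
-- (proved in the loop invariant below), so the `getD 0` default is never used.
def solveWays (dp : PySem.Dict Int Int) (n : Int) : Int × PySem.Dict Int Int :=
  if n = 1 then (0, dp.insert 1 0)
  else if n = 2 then (0, dp.insert 2 0)
  else
    let cur := (PySem.List.pyRange 0 (n - 1) 1).foldl
      (fun cur i => cur + solveCheck n (n - 1) i + solveCheck n i (n - 1)) 0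
    let cur := cur + solveCheck n (n - 1) (n - 1)
    let v := (dp.get? (n - 1)).getD 0 + cur + 2
    (v, dp.insert n v)

def solve (N : Int) : List Int :=
  ((PySem.List.pyRange 1 (N + 1) 1).foldl
    (fun (st : List Int × PySem.Dict Int Int) i =>
      let w := solveWays st.2 i
      let total := PySem.Int.floordiv (i * i * (i * i - 1)) 2
      (st.1 ++ [total - w.1], w.2))
    ([], PySem.Dict.empty)).1

-- ===== PORT B =====
def solve_alt (N : Int) : List Int :=
  (PySem.List.pyRange 1 (N + 1) 1).map
    (fun k => PySem.Int.floordiv (k * k * (k * k - 1)) 2 - 4 * (k - 1) * (k - 2))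

-- ===== PRECONDITION & SPEC =====
def Spec_solve (N : Int) (out : List Int) : Prop := out = solve_alt N
instance (N : Int) (out : List Int) : Decidable (Spec_solve N out) := by unfold Spec_solve; infer_instance

-- ===== CLAIM (what is proved, stated in full; the proofs are below) =====
def Claim_equal_solve : Prop := ∀ (N : Int), Dom_solve N → Spec_solve N (solve N)

-- ===== LEMMAS AND PROOFS =====

-- value of check(n, n-1, i) for 0 ≤ i ≤ n-1 on a board of size n ≥ 3
lemma checkA_val (n i : Int) (hn : 3 ≤ n) (h0 : 0 ≤ i) (h1 : i ≤ n - 1) :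
    solveCheck n (n - 1) i =
      (if i ≤ n - 3 then 1 else 0) + (if 1 ≤ i then 1 else 0) +
      (if i ≤ n - 4 then 1 else 0) + (if 2 ≤ i then 1 else 0) := by
  unfold solveCheck solveDirs
  simp only [List.foldl_cons, List.foldl_nil]
  have e1 : ¬(0 ≤ n - 1 + 2 ∧ n - 1 + 2 < n - 1 ∧ 0 ≤ i + 1 ∧ i + 1 < n - 1) := by omega
  have e2 : ¬(0 ≤ n - 1 + 2 ∧ n - 1 + 2 < n - 1 ∧ 0 ≤ i + -1 ∧ i + -1 < n - 1) := by omega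
  have e3 : (0 ≤ n - 1 + -2 ∧ n - 1 + -2 < n - 1 ∧ 0 ≤ i + 1 ∧ i + 1 < n - 1) ↔ i ≤ n - 3 := by omega
  have e4 : (0 ≤ n - 1 + -2 ∧ n - 1 + -2 < n - 1 ∧ 0 ≤ i + -1 ∧ i + -1 < n - 1) ↔ 1 ≤ i := by omega
  have e5 : ¬(0 ≤ n - 1 + 1 ∧ n - 1 + 1 < n - 1 ∧ 0 ≤ i + 2 ∧ i + 2 < n - 1) := by omega
  have e6 : ¬(0 ≤ n - 1 + 1 ∧ n - 1 + 1 < n - 1 ∧ 0 ≤ i + -2 ∧ i + -2 < n - 1) := by omega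
  have e7 : (0 ≤ n - 1 + -1 ∧ n - 1 + -1 < n - 1 ∧ 0 ≤ i + 2 ∧ i + 2 < n - 1) ↔ i ≤ n - 4 := by omega
  have e8 : (0 ≤ n - 1 + -1 ∧ n - 1 + -1 < n - 1 ∧ 0 ≤ i + -2 ∧ i + -2 < n - 1) ↔ 2 ≤ i := by omega
  simp only [e1, e2, e3, e4, e5, e6, e7, e8, if_false]
  split_ifs <;> omega

-- value of check(n, i, n-1) for 0 ≤ i ≤ n-1 on a board of size n ≥ 3
lemma checkB_val (n i : Int) (hn : 3 ≤ n) (h0 : 0 ≤ i) (h1 : i ≤ n - 1) :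
    solveCheck n i (n - 1) =
      (if i ≤ n - 3 then 1 else 0) + (if 1 ≤ i then 1 else 0) +
      (if i ≤ n - 4 then 1 else 0) + (if 2 ≤ i then 1 else 0) := by
  unfold solveCheck solveDirs
  simp only [List.foldl_cons, List.foldl_nil]
  have e1 : ¬(0 ≤ i + 2 ∧ i + 2 < n - 1 ∧ 0 ≤ n - 1 + 1 ∧ n - 1 + 1 < n - 1) := by omega
  have e2 : (0 ≤ i + 2 ∧ i + 2 < n - 1 ∧ 0 ≤ n - 1 + -1 ∧ n - 1 + -1 < n - 1) ↔ i ≤ n - 4 := by omega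
  have e3 : ¬(0 ≤ i + -2 ∧ i + -2 < n - 1 ∧ 0 ≤ n - 1 + 1 ∧ n - 1 + 1 < n - 1) := by omega
  have e4 : (0 ≤ i + -2 ∧ i + -2 < n - 1 ∧ 0 ≤ n - 1 + -1 ∧ n - 1 + -1 < n - 1) ↔ 2 ≤ i := by omega
  have e5 : ¬(0 ≤ i + 1 ∧ i + 1 < n - 1 ∧ 0 ≤ n - 1 + 2 ∧ n - 1 + 2 < n - 1) := by omega
  have e6 : (0 ≤ i + 1 ∧ i + 1 < n - 1 ∧ 0 ≤ n - 1 + -2 ∧ n - 1 + -2 < n - 1) ↔ i ≤ n - 3 := by omega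
  have e7 : ¬(0 ≤ i + -1 ∧ i + -1 < n - 1 ∧ 0 ≤ n - 1 + 2 ∧ n - 1 + 2 < n - 1) := by omega
  have e8 : (0 ≤ i + -1 ∧ i + -1 < n - 1 ∧ 0 ≤ n - 1 + -2 ∧ n - 1 + -2 < n - 1) ↔ 1 ≤ i := by omega
  simp only [e1, e2, e3, e4, e5, e6, e7, e8, if_false]
  split_ifs <;> omega

-- the border sum of A's ways(n), in closed form
lemma sum_g (n : Int) (hn : 3 ≤ n) (m : Nat) (hm : (m : Int) ≤ n - 1) (c : Int) :
    (PySem.List.pyRange 0 (m : Int) 1).foldl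
      (fun cur i => cur + solveCheck n (n - 1) i + solveCheck n i (n - 1)) c
    = c + 2 * (min (m : Int) (n - 2) + (if 1 ≤ (m : Int) then (m : Int) - 1 else 0) +
               min (m : Int) (n - 3) + (if 2 ≤ (m : Int) then (m : Int) - 2 else 0)) := by
  induction m generalizing c with
  | zero => simp; omega
  | succ k ih =>
    have hk : (k : Int) ≤ n - 1 := by push_cast at hm ⊢; omega
    rw [show ((k + 1 : Nat) : Int) = (k : Int) + 1 by push_cast; ring,
        PySem.List.pyRange_one_succ_right (by positivity), List.foldl_append,
        ih hk]
    simp only [List.foldl_cons, List.foldl_nil]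
    rw [checkA_val n k hn (by positivity) (by omega),
        checkB_val n k hn (by positivity) (by omega)]
    split_ifs <;> omega

-- A's memoised attack count equals the closed form 4*(n-1)*(n-2)
lemma ways_val (dp : PySem.Dict Int Int) (n : Int) (hn : 1 ≤ n)
    (hdp : 3 ≤ n → dp.get? (n - 1) = some (4 * (n - 2) * (n - 3))) :
    solveWays dp n = (4 * (n - 1) * (n - 2), dp.insert n (4 * (n - 1) * (n - 2))) := by
  unfold solveWays
  rcases eq_or_lt_of_le hn with h1 | h1
  · rw [if_pos (by omega)]
    norm_num [← h1]
  rcases eq_or_lt_of_le (show (2 : Int) ≤ n by omega) with h2 | h2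
  · rw [if_neg (by omega), if_pos (by omega)]
    norm_num [← h2]
  have hn3 : 3 ≤ n := by omega
  rw [if_neg (by omega), if_neg (by omega)]
  have hm : ((n - 1).toNat : Int) = n - 1 := by omega
  have hsum := sum_g n hn3 (n - 1).toNat (by omega) 0
  rw [hm] at hsum
  have he :
      (dp.get? (n - 1)).getD 0 +
        ((PySem.List.pyRange 0 (n - 1) 1).foldl
            (fun cur i => cur + solveCheck n (n - 1) i + solveCheck n i (n - 1)) 0 +
          solveCheck n (n - 1) (n - 1)) + 2
      = 4 * (n - 1) * (n - 2) := by
    rw [hdp hn3, Option.getD_some, hsum, checkA_val n (n - 1) hn3 (by omega) (by omega)]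
    have hrest :
        (0 : Int) + 2 * (min (n - 1) (n - 2) + (if 1 ≤ n - 1 then n - 1 - 1 else 0) +
            min (n - 1) (n - 3) + (if 2 ≤ n - 1 then n - 1 - 2 else 0)) +
          ((if n - 1 ≤ n - 3 then 1 else 0) + (if 1 ≤ n - 1 then 1 else 0) +
            (if n - 1 ≤ n - 4 then 1 else 0) + (if 2 ≤ n - 1 then 1 else 0))
        = 8 * n - 18 := by
      split_ifs <;> omega
    rw [hrest]
    ring
  exact congrArg (fun v => (v, dp.insert n v)) he

-- invariant of A's outer loop: the result list matches B's closed form and dp holds 4*(k-1)*(k-2)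
lemma outer (k : Nat) :
    (((PySem.List.pyRange 1 ((k : Int) + 1) 1).foldl
      (fun (st : List Int × PySem.Dict Int Int) i =>
        let w := solveWays st.2 i
        let total := PySem.Int.floordiv (i * i * (i * i - 1)) 2
        (st.1 ++ [total - w.1], w.2))
      ([], PySem.Dict.empty)).1
      = (PySem.List.pyRange 1 ((k : Int) + 1) 1).map
          (fun j => PySem.Int.floordiv (j * j * (j * j - 1)) 2 - 4 * (j - 1) * (j - 2))) ∧
    (1 ≤ k →
      (((PySem.List.pyRange 1 ((k : Int) + 1) 1).foldl
        (fun (st : List Int × PySem.Dict Int Int) i =>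
          let w := solveWays st.2 i
          let total := PySem.Int.floordiv (i * i * (i * i - 1)) 2
          (st.1 ++ [total - w.1], w.2))
        ([], PySem.Dict.empty)).2).get? (k : Int)
        = some (4 * ((k : Int) - 1) * ((k : Int) - 2))) := by
  induction k with
  | zero => simp
  | succ k ih =>
    have hrange : PySem.List.pyRange 1 (((k + 1 : Nat) : Int) + 1) 1
        = PySem.List.pyRange 1 ((k : Int) + 1) 1 ++ [(k : Int) + 1] := by
      rw [show (((k + 1 : Nat) : Int) + 1) = ((k : Int) + 1) + 1 by push_cast; ring]
      exact PySem.List.pyRange_one_succ_right (by omega)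
    have hways := ways_val _ ((k : Int) + 1) (by omega) (fun h3 => by
      have hk1 : 1 ≤ k := by omega
      have := ih.2 hk1
      rw [show ((k : Int) + 1 - 1) = (k : Int) by ring, this]
      congr 1
      ring)
    constructor
    · rw [hrange, List.foldl_append, List.map_append]
      simp only [List.foldl_cons, List.foldl_nil, List.map_cons, List.map_nil]
      rw [hways]
      simp only [ih.1]
    · intro _
      rw [hrange, List.foldl_append]
      simp only [List.foldl_cons, List.foldl_nil]
      rw [hways, show ((k + 1 : Nat) : Int) = (k : Int) + 1 by push_cast; ring,
          PySem.Dict.get?_insert_self]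

-- ===== VERDICT (by name: the statement is the Claim_ definition above) =====
theorem solve_spec : Claim_equal_solve := by
  intro N _
  unfold Spec_solve solve solve_alt
  by_cases hN : N ≤ 0
  · have h0 : PySem.List.pyRange 1 (N + 1) 1 = [] := by
      rw [PySem.List.pyRange_one, show (N + 1 - 1).toNat = 0 from by omega]
      rfl
    rw [h0]
    rfl
  · have hk : N = ((N.toNat : Int)) := by omega
    rw [hk, show ((N.toNat : Int) + 1) = ((N.toNat : Int) + 1) from rfl]
    exact (outer N.toNat).1
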